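-- pv_equiv track=rewrite | github.com/mattaq31/Hash-CAD | crisscross_kit/sec_struc_pred/dot_brac_plotter.py | _backbone_point_sets
-- ===== SOURCE A (Python) =====
-- def _backbone_point_sets(sequences, positions):
--     point_sets = []
--     start = 0
--     for sequence in sequences:
--         end = start + len(sequence)
--         point_sets.append(positions[start:end])
--         start = end
--     return point_sets
-- ===== SOURCE B (Python) =====
-- def _backbone_point_sets(sequences, positions):
--     point_sets = [[] for _ in sequences]
--     owners = [i for i, seq in enumerate(sequences) for _ in seq]
--     for owner, pos in zip(owners, positions):
--         point_sets[owner].append(pos)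
--     return point_sets
-- ===== Notes on version B (the rewrite author's own statement) =====
-- stated objective: alternative
-- what changed: Instead of slicing positions at cumulative-length boundaries, B pre-creates one empty bucket per sequence, builds an ownership-label table (which sequence each position belongs to), and distributes positions one element at a time into their buckets.
import Mathlib
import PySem

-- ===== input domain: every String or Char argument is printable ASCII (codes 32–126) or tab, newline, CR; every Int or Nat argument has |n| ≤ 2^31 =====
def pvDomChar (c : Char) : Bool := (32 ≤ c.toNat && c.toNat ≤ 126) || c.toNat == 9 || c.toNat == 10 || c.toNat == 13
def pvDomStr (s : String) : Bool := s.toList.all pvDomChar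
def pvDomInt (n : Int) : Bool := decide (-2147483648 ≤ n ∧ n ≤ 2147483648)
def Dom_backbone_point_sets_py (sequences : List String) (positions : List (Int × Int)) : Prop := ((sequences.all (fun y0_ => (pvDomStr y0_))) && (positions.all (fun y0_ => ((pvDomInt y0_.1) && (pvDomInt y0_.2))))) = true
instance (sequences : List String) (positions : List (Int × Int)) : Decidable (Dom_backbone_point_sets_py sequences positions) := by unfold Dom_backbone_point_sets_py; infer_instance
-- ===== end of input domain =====

-- B replaces A's cumulative-offset slicing with a bucket distribution: one empty bucket per
-- sequence, an ownership-label table, and a per-position append (alternative algorithm; return value only).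

-- ===== PORT A =====
-- A's loop: for each sequence, end = start + len(sequence); append positions[start:end]; start = end
def pvGoA_backbone (positions : List (Int × Int)) : Int → List String → List (List (Int × Int))
  | _, [] => []
  | start, sequence :: rest =>
    let e := start + (PySem.Str.len sequence : Int)
    PySem.List.slice positions (some start) (some e) :: pvGoA_backbone positions e rest

def backbone_point_sets_py (sequences : List String) (positions : List (Int × Int)) : List (List (Int × Int)) :=
  pvGoA_backbone positions 0 sequences

-- ===== PORT B =====
-- point_sets = [[] for _ in sequences]; owners = [i for i, seq in enumerate(sequences) for _ in seq];
-- for owner, pos in zip(owners, positions): point_sets[owner].append(pos)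
-- (owner is a nonnegative enumerate index, so point_sets[owner] is List.modify at owner.toNat)
def backbone_point_sets_py_alt (sequences : List String) (positions : List (Int × Int)) : List (List (Int × Int)) :=
  let point_sets : List (List (Int × Int)) := sequences.map (fun _ => [])
  let owners : List Int := (PySem.List.enumerate sequences).flatMap (fun iseq => iseq.2.toList.map (fun _ => iseq.1))
  (owners.zip positions).foldl (fun acc op => acc.modify op.1.toNat (fun b => b ++ [op.2])) point_sets

-- ===== PRECONDITION & SPEC =====
def Spec_backbone_point_sets_py (sequences : List String) (positions : List (Int × Int)) (out : List (List (Int × Int))) : Prop := out = backbone_point_sets_py_alt sequences positions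
instance (sequences : List String) (positions : List (Int × Int)) (out : List (List (Int × Int))) : Decidable (Spec_backbone_point_sets_py sequences positions out) := by unfold Spec_backbone_point_sets_py; infer_instance

-- ===== CLAIM (what is proved, stated in full; the proofs are below) =====
def Claim_equal_backbone_point_sets_py : Prop := ∀ (sequences : List String) (positions : List (Int × Int)), Dom_backbone_point_sets_py sequences positions → Spec_backbone_point_sets_py sequences positions (backbone_point_sets_py sequences positions)

-- ===== LEMMAS AND PROOFS =====

-- take/drop characterisation both ports are reduced to
def pvC : List String → List (Int × Int) → List (List (Int × Int))
  | [], _ => []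
  | s :: rest, ps => ps.take s.toList.length :: pvC rest (ps.drop s.toList.length)

lemma pvZipAppend {α β : Type} (l₁ l₂ : List α) (ps : List β) :
    (l₁ ++ l₂).zip ps = l₁.zip ps ++ l₂.zip (ps.drop l₁.length) := by
  induction l₁ generalizing ps with
  | nil => simp
  | cons x xs ih =>
    cases ps with
    | nil => simp
    | cons p ps' => simp [List.zip_cons_cons, ih]

lemma pvModifyAt {α : Type} (pre : List α) (b : α) (t : List α) (f : α → α) :
    (pre ++ b :: t).modify pre.length f = pre ++ f b :: t := by
  induction pre with
  | nil => simp [List.modify]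
  | cons x xs ih => simpa [List.modify] using ih

lemma pvFill (cs : List Char) (ps : List (Int × Int)) (pre : List (List (Int × Int)))
    (b : List (Int × Int)) (t : List (List (Int × Int))) :
    ((cs.map (fun _ => ((pre.length : Int)))).zip ps).foldl
        (fun acc op => acc.modify op.1.toNat (fun b => b ++ [op.2])) (pre ++ b :: t)
      = pre ++ (b ++ ps.take cs.length) :: t := by
  induction cs generalizing ps b with
  | nil => simp
  | cons c cs ih =>
    cases ps with
    | nil => simp
    | cons p ps' =>
      simp only [List.map_cons, List.zip_cons_cons, List.foldl_cons]
      rw [Int.toNat_natCast, pvModifyAt, ih]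
      simp

lemma pvMain (seqs : List String) (ps : List (Int × Int)) (pre : List (List (Int × Int))) :
    ((((PySem.List.enumerate seqs (pre.length : Int)).flatMap
        (fun iseq => iseq.2.toList.map (fun _ => iseq.1))).zip ps).foldl
        (fun acc op => acc.modify op.1.toNat (fun b => b ++ [op.2]))
        (pre ++ seqs.map (fun _ => [])))
      = pre ++ pvC seqs ps := by
  induction seqs generalizing ps pre with
  | nil => simp [PySem.List.enumerate, pvC]
  | cons s rest ih =>
    rw [PySem.List.enumerate_cons]
    simp only [List.flatMap_cons, List.map_cons, pvC]
    rw [pvZipAppend, List.foldl_append, List.length_map]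
    have h1 := pvFill s.toList ps pre [] (rest.map (fun _ => []))
    simp only [List.nil_append] at h1
    rw [h1]
    have hlen : ((pre.length : Int) + 1) = (((pre ++ [ps.take s.toList.length]).length : Nat) : Int) := by
      simp
    rw [hlen]
    have h2 := ih (ps.drop s.toList.length) (pre ++ [ps.take s.toList.length])
    rw [show pre ++ ps.take s.toList.length :: rest.map (fun _ => ([] : List (Int × Int)))
          = (pre ++ [ps.take s.toList.length]) ++ rest.map (fun _ => []) by simp]
    rw [h2]
    simp

lemma pvA_eq (positions : List (Int × Int)) (l : List String) (k : Nat) :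
    pvGoA_backbone positions (k : Int) l = pvC l (positions.drop k) := by
  induction l generalizing k with
  | nil => simp [pvGoA_backbone, pvC]
  | cons s rest ih =>
    show PySem.List.slice positions (some (k : Int)) (some ((k : Int) + PySem.Str.len s)) ::
        pvGoA_backbone positions ((k : Int) + PySem.Str.len s) rest = _
    have hlen : (PySem.Str.len s : Int) = ((s.toList.length : Nat) : Int) := by
      simp [PySem.Str.len]
    rw [hlen, PySem.List.slice_natCast_add, show ((k : Int) + ((s.toList.length : Nat) : Int))
          = (((k + s.toList.length : Nat) : Nat) : Int) by push_cast; ring, ih]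
    simp [pvC, List.drop_drop]

-- ===== VERDICT (by name: the statement is the Claim_ definition above) =====
theorem backbone_point_sets_py_spec : Claim_equal_backbone_point_sets_py := by
  intro sequences positions _
  unfold Spec_backbone_point_sets_py backbone_point_sets_py backbone_point_sets_py_alt
  have hB := pvMain sequences positions []
  simp only [List.length_nil, Nat.cast_zero, List.nil_append] at hB
  rw [hB]
  have hA := pvA_eq positions sequences 0
  simpa using hA
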